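-- pv_equiv track=rewrite | github.com/jcglqmoyx/algorithms | leetcode/lc-us/py/1807.py | evaluate
-- ===== SOURCE A (Python) =====
-- from typing import List
--
-- def evaluate(s: str, knowledge: List[List[str]]) -> str:
--     d = dict(knowledge)
--     res = ''
--     i = 0
--     while i < len(s):
--         if s[i] == '(':
--             j = i + 1
--             while j < len(s) and s[j] != ')':
--                 j += 1
--             key = s[i + 1:j]
--             if key in d:
--                 res += d[key]
--             else:
--                 res += '?'
--             i = j
--         else:
--             res += s[i]
--         i += 1
--     return res
-- ===== SOURCE B (Python) =====
-- from typing import List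
--
-- def evaluate(s: str, knowledge: List[List[str]]) -> str:
--     d = dict(knowledge)
--     out = []
--     while True:
--         pre, opened, s = s.partition('(')
--         out.append(pre)
--         if not opened:
--             return ''.join(out)
--         key, closed, s = s.partition(')')
--         out.append(d.get(key, '?'))
--         if not closed:
--             return ''.join(out)
-- ===== Notes on version B (the rewrite author's own statement) =====
-- stated objective: idiomatic
-- what changed: A's index-driven char-by-char scan with a nested inner while is replaced by a loop of str.partition calls that consume the string chunk-wise (prefix, '(' key, remainder) with a dict.get lookup; Pre_ excludes knowledge entries whose inner list length is not 2, on which dict(knowledge) raises ValueError in both programs.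
import Mathlib
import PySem

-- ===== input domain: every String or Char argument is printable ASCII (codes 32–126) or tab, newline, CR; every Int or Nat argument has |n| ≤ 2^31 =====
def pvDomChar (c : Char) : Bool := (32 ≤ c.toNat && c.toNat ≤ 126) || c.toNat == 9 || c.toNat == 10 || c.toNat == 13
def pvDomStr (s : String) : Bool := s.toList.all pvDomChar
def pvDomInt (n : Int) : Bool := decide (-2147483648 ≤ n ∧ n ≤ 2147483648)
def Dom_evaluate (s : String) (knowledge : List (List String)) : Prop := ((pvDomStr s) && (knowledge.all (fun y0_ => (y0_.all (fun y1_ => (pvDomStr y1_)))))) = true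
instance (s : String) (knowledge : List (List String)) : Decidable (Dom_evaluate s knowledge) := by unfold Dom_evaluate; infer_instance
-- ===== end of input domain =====

-- B replaces A's index-driven character-by-character scan (with a nested inner while) by a
-- chunk-wise loop of str.partition calls; same return value, objective: simpler/idiomatic.

-- ===== PORT A =====
-- dict(knowledge): each pair [k, v] is inserted in order (later duplicates overwrite).
-- Under Pre_ every inner list has length 2, so pyGetD p 0 / p 1 are exactly p[0] / p[1].
def pvDictOf (knowledge : List (List String)) : PySem.Dict String String :=
  knowledge.foldl (fun d p => d.insert (PySem.List.pyGetD p 0 "") (PySem.List.pyGetD p 1 "")) PySem.Dict.empty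

-- inner `while j < len(s) and s[j] != ')': j += 1`
def pvScanJ (cs : List Char) (j : Nat) : Nat :=
  if h : j < cs.length then
    if cs[j] ≠ ')' then pvScanJ cs (j + 1) else j
  else j
termination_by cs.length - j

-- cited by pvALoop's decreasing_by
theorem pvScanJ_le (cs : List Char) (j : Nat) : j ≤ pvScanJ cs j := by
  unfold pvScanJ
  split
  · split
    · exact le_trans (Nat.le_succ j) (pvScanJ_le cs (j + 1))
    · exact le_refl j
  · exact le_refl j
termination_by cs.length - j

-- outer `while i < len(s)` of A; `res` is the accumulated string as a char list
def pvALoop (cs : List Char) (d : PySem.Dict String String) (i : Nat) (res : List Char) : List Char :=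
  if h : i < cs.length then
    if cs[i] = '(' then
      let j := pvScanJ cs (i + 1)
      let key := String.ofList (PySem.List.slice cs (some ((i : Int) + 1)) (some (j : Int)))  -- s[i+1:j]
      let res' := res ++ (if d.contains key then (d.getD key "").toList else ['?'])
      pvALoop cs d (j + 1) res'   -- i = j; i += 1
    else
      pvALoop cs d (i + 1) (res ++ [cs[i]])
  else res
termination_by cs.length - i
decreasing_by
  · have := pvScanJ_le cs (i + 1); omega
  · omega

def evaluate (s : String) (knowledge : List (List String)) : String :=
  String.ofList (pvALoop s.toList (pvDictOf knowledge) 0 [])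

-- ===== PORT B =====
-- `while True` loop of B; each `x.partition(c)` (single-char separator) is ported exactly:
-- head part = x.takeWhile (· ≠ c), separator found iff x.dropWhile (· ≠ c) ≠ [], and the
-- part after the separator is (x.dropWhile (· ≠ c)).tail; `if not opened/closed: return`
-- becomes the two `if h : … = []` early results.
def pvBLoop (d : PySem.Dict String String) (s : List Char) (out : List Char) : List Char :=
  if h1 : s.dropWhile (fun c => c ≠ '(') = [] then
    out ++ s.takeWhile (fun c => c ≠ '(')                      -- not opened: return
  else
    if h2 : ((s.dropWhile (fun c => c ≠ '(')).tail).dropWhile (fun c => c ≠ ')') = [] then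
      out ++ s.takeWhile (fun c => c ≠ '(')
          ++ (d.getD (String.ofList (((s.dropWhile (fun c => c ≠ '(')).tail).takeWhile (fun c => c ≠ ')'))) "?").toList
    else                                                       -- not closed: return after lookup
      pvBLoop d (((s.dropWhile (fun c => c ≠ '(')).tail).dropWhile (fun c => c ≠ ')')).tail
        (out ++ s.takeWhile (fun c => c ≠ '(')
             ++ (d.getD (String.ofList (((s.dropWhile (fun c => c ≠ '(')).tail).takeWhile (fun c => c ≠ ')'))) "?").toList)
termination_by s.length
decreasing_by
  have e1 : (s.dropWhile (fun c => c ≠ '(')).length ≤ s.length := List.length_dropWhile_le _ _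
  have e2 : (((s.dropWhile (fun c => c ≠ '(')).tail).dropWhile (fun c => c ≠ ')')).length
      ≤ ((s.dropWhile (fun c => c ≠ '(')).tail).length := List.length_dropWhile_le _ _
  have n1 : (s.dropWhile (fun c => c ≠ '(')).length ≠ 0 := fun hh => h1 (List.eq_nil_of_length_eq_zero hh)
  have n2 : (((s.dropWhile (fun c => c ≠ '(')).tail).dropWhile (fun c => c ≠ ')')).length ≠ 0 :=
    fun hh => h2 (List.eq_nil_of_length_eq_zero hh)
  simp only [List.length_tail] at e1 e2 n1 n2 ⊢
  omega

def evaluate_alt (s : String) (knowledge : List (List String)) : String :=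
  String.ofList (pvBLoop (pvDictOf knowledge) s.toList [])

-- ===== PRECONDITION & SPEC =====
-- Pre_ excludes exactly the inputs where dict(knowledge) raises ValueError in BOTH programs:
-- an inner list whose length is not 2.
def Pre_evaluate (s : String) (knowledge : List (List String)) : Prop :=
  ∀ p ∈ knowledge, p.length = 2
instance (s : String) (knowledge : List (List String)) : Decidable (Pre_evaluate s knowledge) := by
  unfold Pre_evaluate; infer_instance

def pvWitness_evaluate : String × List (List String) := ("hi(name)!(x)", [["name", "bob"]])

def Spec_evaluate (s : String) (knowledge : List (List String)) (out : String) : Prop := out = evaluate_alt s knowledge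
instance (s : String) (knowledge : List (List String)) (out : String) : Decidable (Spec_evaluate s knowledge out) := by unfold Spec_evaluate; infer_instance

-- ===== CLAIM (what is proved, stated in full; the proofs are below) =====
def Claim_equal_evaluate : Prop := ∀ (s : String) (knowledge : List (List String)), Dom_evaluate s knowledge → Pre_evaluate s knowledge → Spec_evaluate s knowledge (evaluate s knowledge)

-- ===== LEMMAS AND PROOFS =====

-- A's branch `if key in d: res += d[key] else: res += '?'` equals B's d.get(key, '?')
theorem pv_lookup_eq (d : PySem.Dict String String) (k : String) :
    (if d.contains k then (d.getD k "").toList else ['?']) = (d.getD k "?").toList := by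
  by_cases h : d.contains k = true
  · rw [if_pos h]
    rw [PySem.Dict.getD_eq_get?_getD, PySem.Dict.getD_eq_get?_getD]
    rw [PySem.Dict.contains_eq_isSome_get?] at h
    cases hg : d.get? k with
    | none => rw [hg] at h; simp at h
    | some v => rfl
  · rw [if_neg h]
    rw [PySem.Dict.getD_of_not_contains d "?" (by simpa using h)]
    rfl

-- pvScanJ stops at the first ')' at or after i: its value is i + |takeWhile (≠ ')') (drop i)|
theorem pvScanJ_eq (cs : List Char) (i : Nat) (hi : i ≤ cs.length) :
    pvScanJ cs i = i + ((cs.drop i).takeWhile (fun c => c ≠ ')')).length := by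
  unfold pvScanJ
  by_cases h : i < cs.length
  · rw [dif_pos h]
    have hd : cs.drop i = cs[i] :: cs.drop (i + 1) := List.drop_eq_getElem_cons h
    by_cases hc : cs[i] = ')'
    · rw [if_neg (by simp [hc])]
      rw [hd, List.takeWhile_cons, if_neg (by simp [hc])]
      simp
    · rw [if_pos (by simp [hc])]
      rw [pvScanJ_eq cs (i + 1) (by omega)]
      rw [hd, List.takeWhile_cons, if_pos (by simp [hc])]
      simp; omega
  · rw [dif_neg h]
    have : i = cs.length := by omega
    subst this
    simp
termination_by cs.length - i

-- take (|takeWhile p l|) l = takeWhile p l, and drop (|takeWhile p l|) l = dropWhile p l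
theorem pv_take_takeWhile {p : Char → Bool} (l : List Char) :
    l.take (l.takeWhile p).length = l.takeWhile p :=
  (List.prefix_iff_eq_take.mp (List.takeWhile_prefix p)).symm

theorem pv_drop_takeWhile {p : Char → Bool} (l : List Char) :
    l.drop (l.takeWhile p).length = l.dropWhile p := by
  have h : (l.takeWhile p ++ l.dropWhile p).drop (l.takeWhile p).length = l.dropWhile p :=
    List.drop_left
  rwa [List.takeWhile_append_dropWhile] at h

theorem pv_len_takeWhile_add_dropWhile {p : Char → Bool} (l : List Char) :
    (l.takeWhile p).length + (l.dropWhile p).length = l.length := by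
  have h := congrArg List.length (List.takeWhile_append_dropWhile (p := p) (l := l))
  rwa [List.length_append] at h

-- accumulator normalisation for B's loop
theorem pvBLoop_acc (d : PySem.Dict String String) (s out : List Char) :
    pvBLoop d s out = out ++ pvBLoop d s [] := by
  rw [pvBLoop]
  conv_rhs => rw [pvBLoop]
  by_cases h1 : s.dropWhile (fun c => c ≠ '(') = []
  · rw [dif_pos h1, dif_pos h1]; simp
  · rw [dif_neg h1, dif_neg h1]
    by_cases h2 : ((s.dropWhile (fun c => c ≠ '(')).tail).dropWhile (fun c => c ≠ ')') = []
    · rw [dif_pos h2, dif_pos h2]; simp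
    · rw [dif_neg h2, dif_neg h2]
      conv_lhs => rw [pvBLoop_acc d (((s.dropWhile (fun c => c ≠ '(')).tail).dropWhile (fun c => c ≠ ')')).tail]
      conv_rhs => rw [pvBLoop_acc d (((s.dropWhile (fun c => c ≠ '(')).tail).dropWhile (fun c => c ≠ ')')).tail]
      simp
termination_by s.length
decreasing_by
  all_goals
  · have e1 : (s.dropWhile (fun c => c ≠ '(')).length ≤ s.length := List.length_dropWhile_le _ _
    have e2 : (((s.dropWhile (fun c => c ≠ '(')).tail).dropWhile (fun c => c ≠ ')')).length
        ≤ ((s.dropWhile (fun c => c ≠ '(')).tail).length := List.length_dropWhile_le _ _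
    have n1 : (s.dropWhile (fun c => c ≠ '(')).length ≠ 0 := fun hh => h1 (List.eq_nil_of_length_eq_zero hh)
    have n2 : (((s.dropWhile (fun c => c ≠ '(')).tail).dropWhile (fun c => c ≠ ')')).length ≠ 0 :=
      fun hh => h2 (List.eq_nil_of_length_eq_zero hh)
    simp only [List.length_tail] at e1 e2 n1 n2 ⊢
    omega

-- copying one non-'(' character commutes with B's loop
theorem pvBLoop_cons (d : PySem.Dict String String) (c : Char) (t : List Char) (hc : c ≠ '(') :
    pvBLoop d (c :: t) [] = c :: pvBLoop d t [] := by
  have hdw : (c :: t).dropWhile (fun c => c ≠ '(') = t.dropWhile (fun c => c ≠ '(') := by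
    rw [List.dropWhile_cons, if_pos (by simp [hc])]
  have htw : (c :: t).takeWhile (fun c => c ≠ '(') = c :: t.takeWhile (fun c => c ≠ '(') := by
    rw [List.takeWhile_cons, if_pos (by simp [hc])]
  rw [pvBLoop]
  conv_rhs => rw [pvBLoop]
  by_cases h1 : t.dropWhile (fun c => c ≠ '(') = []
  · rw [dif_pos (by rw [hdw]; exact h1), dif_pos h1, htw]; simp
  · rw [dif_neg (by rw [hdw]; exact h1), dif_neg h1]
    simp only [hdw, htw]
    by_cases h2 : ((t.dropWhile (fun c => c ≠ '(')).tail).dropWhile (fun c => c ≠ ')') = []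
    · rw [dif_pos h2, dif_pos h2]; simp
    · rw [dif_neg h2, dif_neg h2]
      conv_lhs => rw [pvBLoop_acc]
      conv_rhs => rw [pvBLoop_acc]
      simp

-- main invariant: A's outer loop from index i produces res ++ (B's loop on the rest)
theorem pvALoop_eq (cs : List Char) (d : PySem.Dict String String) (i : Nat) (res : List Char)
    (hi : i ≤ cs.length) :
    pvALoop cs d i res = res ++ pvBLoop d (cs.drop i) [] := by
  rw [pvALoop]
  by_cases h : i < cs.length
  · rw [dif_pos h]
    have hd : cs.drop i = cs[i] :: cs.drop (i + 1) := List.drop_eq_getElem_cons h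
    by_cases hc : cs[i] = '('
    · rw [if_pos hc]
      set t := cs.drop (i + 1) with ht
      have htlen : t.length = cs.length - (i + 1) := by rw [ht, List.length_drop]
      have hj : pvScanJ cs (i + 1) = i + 1 + (t.takeWhile (fun c => c ≠ ')')).length :=
        pvScanJ_eq cs (i + 1) (by omega)
      have hkey : PySem.List.slice cs (some ((i : Int) + 1)) (some ((pvScanJ cs (i + 1) : Nat) : Int))
          = t.takeWhile (fun c => c ≠ ')') := by
        have hcast : ((i : Int) + 1) = ((i + 1 : Nat) : Int) := by push_cast; ring
        rw [hcast, PySem.List.slice_natCast, hj]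
        have hsub : i + 1 + (t.takeWhile (fun c => c ≠ ')')).length - (i + 1)
            = (t.takeWhile (fun c => c ≠ ')')).length := by omega
        rw [hsub, ← ht, pv_take_takeWhile]
      have hdrop : cs.drop (pvScanJ cs (i + 1) + 1) = (t.dropWhile (fun c => c ≠ ')')).tail := by
        rw [hj]
        have hsplit : i + 1 + (t.takeWhile (fun c => c ≠ ')')).length + 1
            = (i + 1) + ((t.takeWhile (fun c => c ≠ ')')).length + 1) := by omega
        rw [hsplit, ← List.drop_drop, ← ht]
        have : (t.drop (t.takeWhile (fun c => c ≠ ')')).length).drop 1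
            = (t.dropWhile (fun c => c ≠ ')')).drop 1 := by rw [pv_drop_takeWhile]
        rw [← List.drop_drop, this, List.drop_one]
      -- unfold B's loop on '(' :: t
      have hBdw : ('(' :: t).dropWhile (fun c => c ≠ '(') = '(' :: t := by
        rw [List.dropWhile_cons, if_neg (by simp)]
      have hBtw : ('(' :: t).takeWhile (fun c => c ≠ '(') = [] := by
        rw [List.takeWhile_cons, if_neg (by simp)]
      have hsum := pv_len_takeWhile_add_dropWhile (p := fun c => c ≠ ')') t
      rw [hd, hc]
      conv_rhs => rw [pvBLoop]
      rw [dif_neg (by rw [hBdw]; simp)]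
      simp only [hBdw, hBtw, List.tail_cons]
      by_cases h2 : t.dropWhile (fun c => c ≠ ')') = []
      · rw [dif_pos h2]
        -- no ')' after the '(' : A's recursive call starts past the end of cs
        have hjend : ¬ (pvScanJ cs (i + 1) + 1 ≤ cs.length) := by
          have : (t.dropWhile (fun c => c ≠ ')')).length = 0 := by rw [h2]; rfl
          omega
        rw [pvALoop, dif_neg (by omega)]
        rw [hkey, pv_lookup_eq]
        simp
      · rw [dif_neg h2]
        have hjlt : pvScanJ cs (i + 1) + 1 ≤ cs.length := by
          have : (t.dropWhile (fun c => c ≠ ')')).length ≠ 0 :=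
            fun hh => h2 (List.eq_nil_of_length_eq_zero hh)
          omega
        rw [pvALoop_eq cs d _ _ hjlt]
        rw [hkey, pv_lookup_eq, hdrop]
        conv_rhs => rw [pvBLoop_acc]
        simp
    · rw [if_neg hc]
      rw [pvALoop_eq cs d (i + 1) _ (by omega)]
      rw [hd, pvBLoop_cons d cs[i] _ hc]
      simp
  · rw [dif_neg h]
    have : i = cs.length := by omega
    subst this
    rw [List.drop_length, pvBLoop]
    rw [dif_pos (by simp)]
    simp
termination_by cs.length - i
decreasing_by
  all_goals
  · have := pvScanJ_le cs (i + 1)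
    omega

-- ===== VERDICT (by name: the statement is the Claim_ definition above) =====
theorem evaluate_spec : Claim_equal_evaluate := by
  intro s knowledge _ _
  unfold Spec_evaluate evaluate evaluate_alt
  rw [pvALoop_eq s.toList (pvDictOf knowledge) 0 [] (by omega)]
  simp
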